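-- pv_equiv track=rewrite | github.com/pypi-data/pypi-mirror-339 | packages/magiclens/magiclens-0.3.0.tar.gz/magiclens-0.3.0/src/magiclens/content_processors/types/baidu.py | _clean_separators
-- ===== SOURCE A (Python) =====
-- def _clean_separators(markdown: str) -> str:
--     """移除重复的分隔线"""
--     # 分割成行
--     lines = markdown.split('\n')
--
--     # 移除连续的分隔线
--     result = []
--     prev_line_is_separator = False
--
--     for line in lines:
--         is_separator = line.strip() in ['---', '***', '___']
--
--         # 跳过连续的分隔线
--         if is_separator and prev_line_is_separator:
--             continue
--
--         result.append(line)
--         prev_line_is_separator = is_separator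
--
--     return '\n'.join(result)
-- ===== SOURCE B (Python) =====
-- def _clean_separators(markdown: str) -> str:
--     """移除重复的分隔线 — run-grouping rewrite: skip the tail of each separator run."""
--     def is_sep(line):
--         return line.strip() in ('---', '***', '___')
--
--     lines = markdown.split('\n')
--     n = len(lines)
--     out = []
--     i = 0
--     while i < n:
--         out.append(lines[i])
--         if is_sep(lines[i]):
--             i += 1
--             while i < n and is_sep(lines[i]):
--                 i += 1
--         else:
--             i += 1
--     return '\n'.join(out)
-- ===== Notes on version B (the rewrite author's own statement) =====
-- stated objective: alternative
-- what changed: Replaces the prev_line_is_separator flag carried through a single filtered loop by explicit run-grouping: emit each line, and after a separator line skip the whole remaining run of separator lines with an inner scan.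
import Mathlib
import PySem

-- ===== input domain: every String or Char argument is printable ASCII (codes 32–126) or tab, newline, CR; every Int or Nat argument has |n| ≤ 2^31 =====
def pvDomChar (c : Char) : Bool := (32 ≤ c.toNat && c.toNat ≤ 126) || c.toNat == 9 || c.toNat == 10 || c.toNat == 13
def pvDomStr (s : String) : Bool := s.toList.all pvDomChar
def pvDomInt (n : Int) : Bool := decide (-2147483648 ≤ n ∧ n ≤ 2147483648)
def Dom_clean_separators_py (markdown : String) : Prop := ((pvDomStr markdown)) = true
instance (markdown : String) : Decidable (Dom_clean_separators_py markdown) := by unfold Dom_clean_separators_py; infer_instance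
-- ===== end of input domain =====

-- B replaces A's prev-line-is-separator flag by explicit run-grouping (emit a line, then skip the rest of a separator run); alternative decomposition, same cost.

-- ===== PORT A =====
-- is_separator test: line.strip() in ['---', '***', '___']
def pvIsSepA (line : String) : Bool := ["---", "***", "___"].contains (PySem.Str.strip line)

-- the loop body: st = (result, prev_line_is_separator)
def pvStepA (st : List String × Bool) (line : String) : List String × Bool :=
  let is_separator := pvIsSepA line
  if is_separator && st.2 then st
  else (st.1 ++ [line], is_separator)

def clean_separators_py (markdown : String) : String :=
  -- '\n' is a nonempty literal separator, so split? is always `some` here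
  let lines := (PySem.Str.split? markdown "\n").getD []
  let st := lines.foldl pvStepA ([], false)
  PySem.Str.join "\n" st.1

-- ===== PORT B =====
def pvIsSepB (line : String) : Bool := ["---", "***", "___"].contains (PySem.Str.strip line)

-- the outer while loop; the inner while loop that skips the rest of a separator run is the dropWhile
def pvGoB : List String → List String
  | [] => []
  | l :: ls =>
    if pvIsSepB l then l :: pvGoB (ls.dropWhile pvIsSepB)
    else l :: pvGoB ls
termination_by ls => ls.length
decreasing_by
  · exact Nat.lt_succ_of_le (List.length_dropWhile_le _ _)
  · simp

def clean_separators_py_alt (markdown : String) : String :=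
  PySem.Str.join "\n" (pvGoB ((PySem.Str.split? markdown "\n").getD []))

-- ===== PRECONDITION & SPEC =====
def Spec_clean_separators_py (markdown : String) (out : String) : Prop := out = clean_separators_py_alt markdown
instance (markdown : String) (out : String) : Decidable (Spec_clean_separators_py markdown out) := by unfold Spec_clean_separators_py; infer_instance

-- ===== CLAIM (what is proved, stated in full; the proofs are below) =====
def Claim_equal_clean_separators_py : Prop := ∀ (markdown : String), Dom_clean_separators_py markdown → Spec_clean_separators_py markdown (clean_separators_py markdown)

-- ===== LEMMAS AND PROOFS =====
@[simp] lemma pvSepAB : pvIsSepB = pvIsSepA := rfl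

lemma pvFoldA_eq (ls : List String) : ∀ (acc : List String) (prev : Bool),
    (ls.foldl pvStepA (acc, prev)).1
    = acc ++ pvGoB (if prev then ls.dropWhile pvIsSepA else ls) := by
  induction ls with
  | nil => intro acc prev; cases prev <;> simp [pvGoB]
  | cons l ls ih =>
    intro acc prev
    rw [List.foldl_cons]
    by_cases h : pvIsSepA l = true
    · cases prev
      · rw [show pvStepA (acc, false) l = (acc ++ [l], pvIsSepA l) by simp [pvStepA], h, ih]
        simp [pvGoB, pvSepAB, h]
      · rw [show pvStepA (acc, true) l = (acc, true) by simp [pvStepA, h], ih]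
        simp [h]
    · simp only [Bool.not_eq_true] at h
      cases prev <;>
      · rw [show pvStepA (acc, _) l = (acc ++ [l], pvIsSepA l) by simp [pvStepA, h], h, ih]
        simp [pvGoB, pvSepAB, h]

-- ===== VERDICT (by name: the statement is the Claim_ definition above) =====
theorem clean_separators_py_spec : Claim_equal_clean_separators_py := by
  intro markdown _
  unfold Spec_clean_separators_py
  simp only [clean_separators_py, clean_separators_py_alt]
  rw [pvFoldA_eq]
  simp
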